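-- pv_equiv track=rewrite | github.com/anupyadav27/threat-engine | engine_secops/scanner_engine/java_scanner/logic_implementations.py | custom_java_bug_anonymous_classes
-- ===== SOURCE A (Python) =====
-- def custom_java_bug_anonymous_classes(node):
--     """
--     Returns True if an anonymous class exceeds the allowed line limit (default: 10).
--     """
--     if isinstance(node, dict):
--         source_code = node.get('source', '')
--         name = node.get('name', '')
--         # Heuristic: anonymous classes often have no name or contain 'new Type() {'
--         if source_code and ('new ' in source_code and '{' in source_code):
--             # Count lines inside the anonymous class body
--             lines = source_code.split('\n')
--             # Find the start of the anonymous class body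
--             for i, line in enumerate(lines):
--                 if 'new ' in line and '{' in line:
--                     # Count lines until matching closing brace
--                     brace_count = 0
--                     body_lines = 0
--                     for j in range(i, len(lines)):
--                         brace_count += lines[j].count('{')
--                         brace_count -= lines[j].count('}')
--                         body_lines += 1
--                         if brace_count == 0:
--                             break
--                     # Default line limit is 10
--                     if body_lines > 10:
--                         return True
--     return False
-- ===== SOURCE B (Python) =====
-- def custom_java_bug_anonymous_classes(node):
--     """
--     Returns True if an anonymous class exceeds the allowed line limit (default: 10).
--     """
--     if not isinstance(node, dict):
--         return False
--     source_code = node.get('source', '')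
--     if not (source_code and ('new ' in source_code and '{' in source_code)):
--         return False
--     lines = source_code.split('\n')
--     n = len(lines)
--     # Prefix brace balance: P[k] = sum over first k lines of ('{' count - '}' count).
--     P = [0] * (n + 1)
--     for k in range(n):
--         P[k + 1] = P[k] + lines[k].count('{') - lines[k].count('}')
--     # One right-to-left pass: nxt[i] = smallest k > i with P[k] == P[i], or None.
--     nxt = [None] * (n + 1)
--     seen = {}
--     for k in range(n, -1, -1):
--         nxt[k] = seen.get(P[k])
--         seen[P[k]] = k
--     for i, (line, k) in enumerate(zip(lines, nxt)):
--         if 'new ' in line and '{' in line: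
--             body = (k - i) if k is not None else (n - i)
--             if body > 10:
--                 return True
--     return False
-- ===== Notes on version B (the rewrite author's own statement) =====
-- stated objective: alternative
-- what changed: A rescans braces line by line from every candidate line; B computes one prefix brace-balance array and one right-to-left pass building next-equal-prefix links, then reads each candidate's body length in O(1).
import Mathlib
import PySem

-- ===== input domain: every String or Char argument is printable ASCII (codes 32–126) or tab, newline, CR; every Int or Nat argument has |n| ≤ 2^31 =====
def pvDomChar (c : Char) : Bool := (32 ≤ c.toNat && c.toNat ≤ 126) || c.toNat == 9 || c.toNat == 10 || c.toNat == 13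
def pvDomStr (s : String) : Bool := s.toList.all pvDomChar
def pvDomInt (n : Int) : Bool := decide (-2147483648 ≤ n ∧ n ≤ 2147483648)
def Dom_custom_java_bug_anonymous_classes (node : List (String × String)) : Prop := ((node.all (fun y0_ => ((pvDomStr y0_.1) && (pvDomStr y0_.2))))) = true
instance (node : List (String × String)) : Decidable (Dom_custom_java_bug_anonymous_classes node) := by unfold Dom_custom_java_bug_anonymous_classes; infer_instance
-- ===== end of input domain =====

-- B replaces A's per-candidate brace rescan by one prefix brace-balance array and one
-- right-to-left pass building next-equal-prefix links (objective: alternative algorithm).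

-- ===== PORT A =====
-- candidate test: 'new ' in line and '{' in line
def cjbacCand (l : String) : Bool := PySem.Str.isIn "new " l && PySem.Str.isIn "{" l

-- A's inner loop: for j in range(i, len(lines)): bc += count('{') - count('}'); bl += 1; break on bc == 0
def cjbacAInner : List String → Int → Nat → Nat
  | [], _, bl => bl
  | l :: rest, bc, bl =>
    let bc' := bc + (PySem.Str.count l "{" : Int) - (PySem.Str.count l "}" : Int)
    if bc' = 0 then bl + 1 else cjbacAInner rest bc' (bl + 1)

-- A's outer loop over enumerate(lines) with early return
def cjbacAScan (lines : List String) : Nat → List String → Bool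
  | _, [] => false
  | i, l :: rest =>
    if cjbacCand l then
      if 10 < cjbacAInner (lines.drop i) 0 0 then true
      else cjbacAScan lines (i + 1) rest
    else cjbacAScan lines (i + 1) rest

def custom_java_bug_anonymous_classes (node : List (String × String)) : Bool :=
  let source := PySem.Dict.getD ⟨node⟩ "source" ""
  let _name := PySem.Dict.getD ⟨node⟩ "name" ""
  if (!(source == "")) && PySem.Str.isIn "new " source && PySem.Str.isIn "{" source then
    let lines := (PySem.Str.split? source "\n").getD []
    cjbacAScan lines 0 lines
  else false

-- ===== PORT B =====
-- per-line brace balance lines[k].count('{') - lines[k].count('}')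
def cjbacDelta (l : String) : Int := (PySem.Str.count l "{" : Int) - (PySem.Str.count l "}" : Int)

-- Source B's prefix loop: P[k+1] = P[k] + delta(lines[k])  (P[0] = 0 is prepended at the call site)
def cjbacQ : Int → List Int → List Int
  | _, [] => []
  | bc, d :: rest => (bc + d) :: cjbacQ (bc + d) rest

-- Source B's right-to-left pass: nxt[k] = seen.get(P[k]); seen[P[k]] = k   (k = n down to 0)
def cjbacNxt : List Int → Nat → PySem.Dict Int Nat × List (Option Nat)
  | [], _ => (PySem.Dict.empty, [])
  | v :: rest, k =>
    let p := cjbacNxt rest (k + 1)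
    (p.1.insert v k, p.1.get? v :: p.2)

-- body = (k - i) if k is not None else (n - i)
def cjbacBody (n i : Nat) : Option Nat → Int
  | some k => (k : Int) - (i : Int)
  | none => (n : Int) - (i : Int)

-- Source B's candidate loop over enumerate(zip(lines, nxt)) with early return
def cjbacBScan (n : Nat) : Nat → List (String × Option Nat) → Bool
  | _, [] => false
  | i, ln :: rest =>
    if cjbacCand ln.1 then
      if 10 < cjbacBody n i ln.2 then true
      else cjbacBScan n (i + 1) rest
    else cjbacBScan n (i + 1) rest

def custom_java_bug_anonymous_classes_alt (node : List (String × String)) : Bool :=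
  let source := PySem.Dict.getD ⟨node⟩ "source" ""
  if (!(source == "")) && PySem.Str.isIn "new " source && PySem.Str.isIn "{" source then
    let lines := (PySem.Str.split? source "\n").getD []
    let n := lines.length
    let P : List Int := 0 :: cjbacQ 0 (lines.map cjbacDelta)
    let nxt := (cjbacNxt P 0).2
    cjbacBScan n 0 (lines.zip nxt)
  else false

-- ===== PRECONDITION & SPEC =====
def Spec_custom_java_bug_anonymous_classes (node : List (String × String)) (out : Bool) : Prop := out = custom_java_bug_anonymous_classes_alt node
instance (node : List (String × String)) (out : Bool) : Decidable (Spec_custom_java_bug_anonymous_classes node out) := by unfold Spec_custom_java_bug_anonymous_classes; infer_instance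

-- ===== CLAIM (what is proved, stated in full; the proofs are below) =====
def Claim_equal_custom_java_bug_anonymous_classes : Prop := ∀ (node : List (String × String)), Dom_custom_java_bug_anonymous_classes node → Spec_custom_java_bug_anonymous_classes node (custom_java_bug_anonymous_classes node)

-- ===== LEMMAS AND PROOFS =====

-- first index (0-based) of target t in a list
def cjbacFI : List Int → Int → Option Nat
  | [], _ => none
  | v :: rest, t => if v = t then some 0 else (cjbacFI rest t).map (· + 1)

-- prefix value bc + sum of the first i deltas
def cjbacAt (bc : Int) (ds : List Int) (i : Nat) : Int := bc + (ds.take i).sum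

-- spec form of the nxt list: entry at index k is the first later position with an equal prefix value
def cjbacNS : List Int → Nat → List (Option Nat)
  | [], _ => []
  | v :: rest, k => ((cjbacFI rest v).map (k + 1 + ·)) :: cjbacNS rest (k + 1)

lemma cjbacAInner_eq (ls : List String) : ∀ (bc : Int) (bl : Nat),
    cjbacAInner ls bc bl
      = bl + (match cjbacFI (cjbacQ bc (ls.map cjbacDelta)) 0 with
              | some m => m + 1
              | none => ls.length) := by
  induction ls with
  | nil => intro bc bl; simp [cjbacAInner, cjbacQ, cjbacFI]
  | cons l rest ih =>
    intro bc bl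
    have hA : cjbacAInner (l :: rest) bc bl
        = if bc + cjbacDelta l = 0 then bl + 1
          else cjbacAInner rest (bc + cjbacDelta l) (bl + 1) := by
      simp only [cjbacAInner, cjbacDelta, add_sub_assoc]
    rw [hA]
    simp only [List.map_cons, cjbacQ, cjbacFI]
    by_cases h : bc + cjbacDelta l = 0
    · simp [h]
    · rw [if_neg h, if_neg h, ih]
      cases hfi : cjbacFI (cjbacQ (bc + cjbacDelta l) (rest.map cjbacDelta)) 0 <;>
        simp [hfi, List.length_cons]
      all_goals (clear hA ih; simp [Nat.add_comm, Nat.add_assoc, Nat.add_left_comm])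

lemma cjbacQ_shift (ds : List Int) : ∀ (bc c : Int),
    cjbacQ (bc + c) ds = (cjbacQ bc ds).map (· + c) := by
  induction ds with
  | nil => intro bc c; simp [cjbacQ]
  | cons d rest ih =>
    intro bc c
    simp only [cjbacQ, List.map_cons]
    rw [show bc + c + d = bc + d + c by ring, ih]

lemma cjbacFI_shift (xs : List Int) : ∀ (t c : Int),
    cjbacFI (xs.map (· + c)) (t + c) = cjbacFI xs t := by
  induction xs with
  | nil => intro t c; simp [cjbacFI]
  | cons v rest ih =>
    intro t c
    simp only [List.map_cons, cjbacFI]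
    by_cases h : v = t
    · simp [h]
    · rw [if_neg (by omega), if_neg h, ih]

lemma cjbacQ_drop (ds : List Int) : ∀ (bc : Int) (i : Nat),
    (cjbacQ bc ds).drop i = cjbacQ (cjbacAt bc ds i) (ds.drop i) := by
  induction ds with
  | nil => intro bc i; simp [cjbacQ]
  | cons d rest ih =>
    intro bc i
    cases i with
    | zero => simp [cjbacAt]
    | succ j =>
      simp only [cjbacQ, List.drop_succ_cons, ih]
      congr 1
      simp [cjbacAt]
      ring

lemma cjbacP_get (ds : List Int) : ∀ (bc : Int) (i : Nat), i ≤ ds.length →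
    (bc :: cjbacQ bc ds)[i]? = some (cjbacAt bc ds i) := by
  induction ds with
  | nil =>
    intro bc i h
    have hi0 : i = 0 := Nat.le_zero.mp (by simpa using h)
    subst hi0
    simp [cjbacQ, cjbacAt]
  | cons d rest ih =>
    intro bc i h
    cases i with
    | zero => simp [cjbacAt]
    | succ j =>
      simp only [cjbacQ, List.getElem?_cons_succ]
      rw [ih (bc + d) j (by simp only [List.length_cons] at h; omega)]
      congr 1
      simp [cjbacAt]
      ring

lemma cjbacNxt_fst_get (vs : List Int) : ∀ (k : Nat) (t : Int),
    (cjbacNxt vs k).1.get? t = (cjbacFI vs t).map (k + ·) := by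
  induction vs with
  | nil => intro k t; simp [cjbacNxt, cjbacFI, PySem.Dict.get?_empty]
  | cons v rest ih =>
    intro k t
    simp only [cjbacNxt, cjbacFI]
    rw [PySem.Dict.get?_insert]
    by_cases h : t = v
    · simp [h]
    · rw [if_neg h, if_neg (by omega : ¬ v = t), ih]
      cases hfi : cjbacFI rest t <;> simp [hfi]
      all_goals omega

lemma cjbacNxt_snd (vs : List Int) : ∀ (k : Nat),
    (cjbacNxt vs k).2 = cjbacNS vs k := by
  induction vs with
  | nil => intro k; simp [cjbacNxt, cjbacNS]
  | cons v rest ih =>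
    intro k
    simp only [cjbacNxt, cjbacNS]
    rw [cjbacNxt_fst_get, ih]

lemma cjbacNS_length (vs : List Int) : ∀ k, (cjbacNS vs k).length = vs.length := by
  induction vs with
  | nil => intro k; simp [cjbacNS]
  | cons v rest ih => intro k; simp [cjbacNS, ih]

lemma cjbacNS_get (vs : List Int) : ∀ (k i : Nat) (h : i < vs.length),
    (cjbacNS vs k)[i]? = some ((cjbacFI (vs.drop (i + 1)) (vs[i]'h)).map (k + i + 1 + ·)) := by
  induction vs with
  | nil => intro k i h; simp at h
  | cons v rest ih =>
    intro k i h
    cases i with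
    | zero =>
      simp only [cjbacNS, List.getElem?_cons_zero, List.drop_succ_cons, List.drop_zero,
        List.getElem_cons_zero]
    | succ j =>
      have hj : j < rest.length := by simp only [List.length_cons] at h; omega
      simp only [cjbacNS, List.getElem?_cons_succ, List.getElem_cons_succ]
      rw [ih (k + 1) j hj]
      simp only [List.drop_succ_cons]
      cases hfi : cjbacFI (rest.drop (j + 1)) (rest[j]'hj) <;> simp [hfi]
      all_goals omega

lemma cjbacScan_eq (lines : List String) (n : Nat) :
    ∀ (suf : List String) (nsuf : List (Option Nat)) (i : Nat),
    suf.length ≤ nsuf.length →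
    (∀ j, j < suf.length →
      ((10 < cjbacAInner (lines.drop (i + j)) 0 0) ↔ (10 < cjbacBody n (i + j) nsuf[j]!))) →
    cjbacAScan lines i suf = cjbacBScan n i (suf.zip nsuf) := by
  intro suf
  induction suf with
  | nil => intro nsuf i _ _; simp [cjbacAScan, cjbacBScan]
  | cons l rest ih =>
    intro nsuf i hlen hbody
    cases nsuf with
    | nil => simp at hlen
    | cons o os =>
      simp only [List.zip_cons_cons, cjbacAScan, cjbacBScan]
      by_cases hc : cjbacCand l
      · simp only [hc, if_true]
        have h0 := hbody 0 (by simp)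
        simp only [Nat.add_zero, List.getElem!_cons_zero] at h0
        by_cases ht : 10 < cjbacAInner (lines.drop i) 0 0
        · rw [if_pos ht, if_pos (h0.mp ht)]
        · rw [if_neg ht, if_neg (fun hh => ht (h0.mpr hh))]
          exact ih os (i + 1) (by simpa using hlen)
            (fun j hj => by
              have := hbody (j + 1) (by simpa using Nat.succ_lt_succ hj)
              simpa [Nat.add_assoc, Nat.add_comm 1 j] using this)
      · simp only [hc, if_false]
        exact ih os (i + 1) (by simpa using hlen)
          (fun j hj => by
            have := hbody (j + 1) (by simpa using Nat.succ_lt_succ hj)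
            simpa [Nat.add_assoc, Nat.add_comm 1 j] using this)

lemma cjbacQ_length (ds : List Int) : ∀ bc, (cjbacQ bc ds).length = ds.length := by
  induction ds with
  | nil => intro bc; simp [cjbacQ]
  | cons d rest ih => intro bc; simp [cjbacQ, ih]

-- per-index body agreement: A's inner brace scan from line i tests the same bound as
-- B's next-equal-prefix link at index i
lemma cjbacBody_eq (lines : List String) (i : Nat) (hi : i < lines.length) :
    ((10 < cjbacAInner (lines.drop i) 0 0) ↔
      (10 < cjbacBody lines.length i
        (cjbacNS (0 :: cjbacQ 0 (lines.map cjbacDelta)) 0)[i]!)) := by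
  have hlds : (lines.map cjbacDelta).length = lines.length := by simp
  have hiP : i < (0 :: cjbacQ 0 (lines.map cjbacDelta)).length := by
    simp [cjbacQ_length]; omega
  have hNS := cjbacNS_get (0 :: cjbacQ 0 (lines.map cjbacDelta)) 0 i hiP
  -- identify P[i]
  have hPi : (0 :: cjbacQ 0 (lines.map cjbacDelta))[i]'hiP
      = cjbacAt 0 (lines.map cjbacDelta) i := by
    have h? := cjbacP_get (lines.map cjbacDelta) 0 i (by omega)
    have := List.getElem?_eq_getElem hiP
    rw [this] at h?
    exact Option.some.inj h?
  -- identify P.drop (i+1)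
  have hPd : (0 :: cjbacQ 0 (lines.map cjbacDelta)).drop (i + 1)
      = cjbacQ (cjbacAt 0 (lines.map cjbacDelta) i) ((lines.map cjbacDelta).drop i) := by
    rw [List.drop_succ_cons, cjbacQ_drop]
  -- reduce the FI target to balance 0 over the dropped suffix
  have hFI : cjbacFI ((0 :: cjbacQ 0 (lines.map cjbacDelta)).drop (i + 1))
        ((0 :: cjbacQ 0 (lines.map cjbacDelta))[i]'hiP)
      = cjbacFI (cjbacQ 0 ((lines.map cjbacDelta).drop i)) 0 := by
    rw [hPd, hPi]
    have hshift : cjbacQ (cjbacAt 0 (lines.map cjbacDelta) i) ((lines.map cjbacDelta).drop i)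
        = (cjbacQ 0 ((lines.map cjbacDelta).drop i)).map (· + cjbacAt 0 (lines.map cjbacDelta) i) := by
      rw [← cjbacQ_shift]
      ring_nf
    rw [hshift]
    have := cjbacFI_shift (cjbacQ 0 ((lines.map cjbacDelta).drop i)) 0
      (cjbacAt 0 (lines.map cjbacDelta) i)
    simpa using this
  rw [hFI] at hNS
  have hget : (cjbacNS (0 :: cjbacQ 0 (lines.map cjbacDelta)) 0)[i]!
      = (cjbacFI (cjbacQ 0 ((lines.map cjbacDelta).drop i)) 0).map (0 + i + 1 + ·) := by
    have hlen : i < (cjbacNS (0 :: cjbacQ 0 (lines.map cjbacDelta)) 0).length := by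
      rw [cjbacNS_length]; exact hiP
    rw [List.getElem!_eq_getElem?_getD, hNS]
    simp
  have hA := cjbacAInner_eq (lines.drop i) 0 0
  rw [List.map_drop] at hA
  cases hfi : cjbacFI (cjbacQ 0 ((lines.map cjbacDelta).drop i)) 0 with
  | some m =>
    rw [hfi] at hA hget
    simp only [Option.map_some] at hget
    have hA' : cjbacAInner (lines.drop i) 0 0 = m + 1 := by rw [hA]; simp
    rw [hA', hget]
    simp only [cjbacBody]
    clear hA hA' hNS hget hFI hPd hPi hiP hlds hfi
    constructor <;> intro h <;> [push_cast; omega] <;> omega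
  | none =>
    rw [hfi] at hA hget
    simp only [Option.map_none] at hget
    have hA' : cjbacAInner (lines.drop i) 0 0 = lines.length - i := by
      rw [hA]; simp
    rw [hA', hget]
    simp only [cjbacBody]
    clear hA hA' hNS hget hFI hPd hPi hiP hlds hfi
    constructor <;> intro h <;> omega

theorem cjbac_main : ∀ (node : List (String × String)),
    custom_java_bug_anonymous_classes node = custom_java_bug_anonymous_classes_alt node := by
  intro node
  unfold custom_java_bug_anonymous_classes custom_java_bug_anonymous_classes_alt
  simp only []
  by_cases hg : ((!(PySem.Dict.getD ⟨node⟩ "source" "" == ""))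
      && PySem.Str.isIn "new " (PySem.Dict.getD ⟨node⟩ "source" "")
      && PySem.Str.isIn "{" (PySem.Dict.getD ⟨node⟩ "source" "")) = true
  · rw [if_pos hg, if_pos hg]
    set lines := (PySem.Str.split? (PySem.Dict.getD ⟨node⟩ "source" "") "\n").getD [] with hl
    rw [cjbacNxt_snd]
    apply cjbacScan_eq
    · rw [cjbacNS_length]
      simp [cjbacQ_length]
    · intro j hj
      simpa using cjbacBody_eq lines j hj
  · rw [if_neg hg, if_neg hg]

-- ===== VERDICT (by name: the statement is the Claim_ definition above) =====
theorem custom_java_bug_anonymous_classes_spec : Claim_equal_custom_java_bug_anonymous_classes := by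
  intro node _
  unfold Spec_custom_java_bug_anonymous_classes
  exact cjbac_main node
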